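-- pv_equiv track=rewrite | github.com/cmarti/epik | epik/src/utils.py | get_one_hot_subseq_key
-- ===== SOURCE A (Python) =====
-- from itertools import product, chain
--
-- def get_one_hot_subseq_key(alphabet, max_l=1):
--     subseq_key = {}
--     for i, c in enumerate(alphabet):
--         z = [0] * len(alphabet)
--         z[i] = 1
--         subseq_key[c] = z
--
--     if max_l > 1:
--         for k in range(2, max_l):
--             for alleles in product(alphabet, repeat=k):
--                 seq = ''.join(alleles)
--                 subseq_key[seq] = []
--                 for c in alleles:
--                     subseq_key[seq] += subseq_key[c]
--     return(subseq_key)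
-- ===== SOURCE B (Python) =====
-- def get_one_hot_subseq_key(alphabet, max_l=1):
--     # Bottom-up DP: each length-k key is built from the stored length-(k-1)
--     # prefix value plus one single-char value, instead of re-summing singles.
--     n = len(alphabet)
--     subseq_key = {}
--     for i, c in enumerate(alphabet):
--         subseq_key[c] = [1 if j == i else 0 for j in range(n)]
--     prev = [c for c in subseq_key]
--     for _ in range(2, max_l):
--         cur = []
--         for p in prev:
--             for c in alphabet:
--                 s = p + c
--                 if s not in subseq_key:
--                     subseq_key[s] = subseq_key[p] + subseq_key[c]
--                     cur.append(s)
--         prev = cur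
--     return subseq_key
-- ===== Notes on version B (the rewrite author's own statement) =====
-- stated objective: alternative
-- what changed: B builds the dict bottom-up by length: each length-k key is formed from a stored length-(k-1) prefix value plus one single-char value (one list concatenation per key, iterating distinct previous-level keys), instead of A's re-expansion of the full character product and re-summation of single-char encodings for every tuple.
import Mathlib
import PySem

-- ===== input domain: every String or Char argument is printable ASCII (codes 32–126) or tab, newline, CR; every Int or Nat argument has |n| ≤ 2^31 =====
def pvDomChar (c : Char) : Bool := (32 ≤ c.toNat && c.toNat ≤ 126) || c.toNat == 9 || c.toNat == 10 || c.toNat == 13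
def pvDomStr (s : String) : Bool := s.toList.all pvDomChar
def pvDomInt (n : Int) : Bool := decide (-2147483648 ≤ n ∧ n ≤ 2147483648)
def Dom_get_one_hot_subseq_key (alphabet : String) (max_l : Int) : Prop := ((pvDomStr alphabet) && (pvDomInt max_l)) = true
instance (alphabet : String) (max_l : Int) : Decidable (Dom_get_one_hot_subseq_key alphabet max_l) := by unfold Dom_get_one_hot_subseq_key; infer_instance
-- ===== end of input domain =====

-- B rebuilds the dict bottom-up: each length-k value is the stored length-(k-1) prefix value
-- plus one single-char value (objective: alternative decomposition; same return value).

-- ===== PORT A =====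
-- itertools.product(alphabet, repeat=k), in itertools order (last coordinate varies fastest)
def pvProduct (α : List Char) : Nat → List (List Char)
  | 0 => [[]]
  | k + 1 => (pvProduct α k).flatMap (fun t => α.map (fun c => t ++ [c]))

-- the initial loop: for i, c in enumerate(alphabet): z = [0]*len(alphabet); z[i] = 1; subseq_key[c] = z
def pvInitA (alphabet : String) : PySem.Dict String (List Int) :=
  (PySem.List.enumerate alphabet.toList).foldl
    (fun d ic =>
      d.insert (String.ofList [ic.2]) ((List.replicate alphabet.toList.length (0 : Int)).set ic.1.toNat 1))
    PySem.Dict.empty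

-- one iteration of `for k in range(2, max_l)`: the product loop with the += rebuild of subseq_key[seq]
def pvStepA (α : List Char) (d : PySem.Dict String (List Int)) (k : Int) : PySem.Dict String (List Int) :=
  (pvProduct α k.toNat).foldl
    (fun d alleles =>
      alleles.foldl
        (fun d' c =>
          d'.insert (String.ofList alleles)
            (d'.getD (String.ofList alleles) [] ++ d'.getD (String.ofList [c]) []))
        (d.insert (String.ofList alleles) ([] : List Int)))
    d

def get_one_hot_subseq_key (alphabet : String) (max_l : Int) : List (String × List Int) :=
  let d0 := pvInitA alphabet
  (if max_l > 1 then (PySem.List.pyRange 2 max_l 1).foldl (pvStepA alphabet.toList) d0 else d0).items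

-- ===== PORT B =====
-- subseq_key[c] = [1 if j == i else 0 for j in range(n)]
def pvInitB (alphabet : String) : PySem.Dict String (List Int) :=
  (PySem.List.enumerate alphabet.toList).foldl
    (fun d ic =>
      d.insert (String.ofList [ic.2])
        ((PySem.List.pyRange 0 alphabet.toList.length 1).map (fun j => if j = ic.1 then (1 : Int) else 0)))
    PySem.Dict.empty

-- one iteration of `for _ in range(2, max_l)`: state = (subseq_key, prev); cur starts empty
def pvStepB (α : List Char) (st : PySem.Dict String (List Int) × List String) (_k : Int) :
    PySem.Dict String (List Int) × List String :=
  st.2.foldl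
    (fun st2 p =>
      α.foldl
        (fun st3 c =>
          if st3.1.contains (p ++ String.ofList [c]) then st3
          else (st3.1.insert (p ++ String.ofList [c])
                  (st3.1.getD p [] ++ st3.1.getD (String.ofList [c]) []),
                st3.2 ++ [p ++ String.ofList [c]]))
        st2)
    (st.1, [])

def get_one_hot_subseq_key_alt (alphabet : String) (max_l : Int) : List (String × List Int) :=
  let d0 := pvInitB alphabet
  ((PySem.List.pyRange 2 max_l 1).foldl (pvStepB alphabet.toList) (d0, d0.keys)).1.items

-- ===== PRECONDITION & SPEC =====
def Spec_get_one_hot_subseq_key (alphabet : String) (max_l : Int) (out : List (String × List Int)) : Prop := out = get_one_hot_subseq_key_alt alphabet max_l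
instance (alphabet : String) (max_l : Int) (out : List (String × List Int)) : Decidable (Spec_get_one_hot_subseq_key alphabet max_l out) := by unfold Spec_get_one_hot_subseq_key; infer_instance

-- ===== CLAIM (what is proved, stated in full; the proofs are below) =====
def Claim_equal_get_one_hot_subseq_key : Prop := ∀ (alphabet : String) (max_l : Int), Dom_get_one_hot_subseq_key alphabet max_l → Spec_get_one_hot_subseq_key alphabet max_l (get_one_hot_subseq_key alphabet max_l)

-- ===== LEMMAS AND PROOFS =====

-- the value A and B both store at key s: concatenation of the single-char one-hots of d1
def pvVal (d1 : PySem.Dict String (List Int)) (s : String) : List Int :=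
  (s.toList.map (fun c => d1.getD (String.ofList [c]) [])).flatten

-- B's expansion of a prefix
def pvF (α : List Char) (p : String) : List String := α.map (fun c => p ++ String.ofList [c])

-- first-occurrence dedup of a list, excluding `seen`
def pvNew (seen : List String) : List String → List String
  | [] => []
  | s :: ss => if s ∈ seen then pvNew seen ss else s :: pvNew (s :: seen) ss

-- level-k strings in A's product order
def pvStrs (α : List Char) (k : Nat) : List String := (pvProduct α k).map String.ofList

-- canonical level keys: pvKS j = the distinct strings of level j+1, in insertion order
def pvKS (α : List Char) (k1 : List String) : Nat → List String
  | 0 => k1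
  | j + 1 => pvNew [] ((pvKS α k1 j).flatMap (pvF α))

-- canonical dict items after processing levels 2..j+1
def pvDI (α : List Char) (d1 : PySem.Dict String (List Int)) : Nat → List (String × List Int)
  | 0 => d1.items
  | j + 1 => pvDI α d1 j ++ (pvKS α d1.keys (j + 1)).map (fun s => (s, pvVal d1 s))

-- the canonical fold: skip if present, else insert (s, v s) and record s
def pvAddSkip (v : String → List Int) (st : PySem.Dict String (List Int) × List String)
    (ss : List String) : PySem.Dict String (List Int) × List String :=
  ss.foldl (fun st s => if st.1.contains s then st else (st.1.insert s (v s), st.2 ++ [s])) st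

-- fold congruence carrying a state invariant
theorem pvFoldlCongrInv {σ τ : Type} (P : τ → Prop) (l : List σ) (f g : τ → σ → τ) (init : τ)
    (h0 : P init) (hstep : ∀ acc x, P acc → x ∈ l → f acc x = g acc x ∧ P (g acc x)) :
    l.foldl f init = l.foldl g init ∧ P (l.foldl g init) := by
  induction l generalizing init with
  | nil => exact ⟨rfl, h0⟩
  | cons x xs ih =>
    obtain ⟨hfg, hP⟩ := hstep init x h0 (by simp)
    simp only [List.foldl_cons, hfg]
    exact ih (g init x) hP (fun acc y hacc hy => hstep acc y hacc (by simp [hy]))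


-- dicts with equal item lists are equal
theorem pv_dict_ext (d e : PySem.Dict String (List Int)) (h : d.items = e.items) : d = e := by
  cases d; cases e; cases h; rfl

-- get? over an append whose right part has keys of different length than s
theorem pv_get?_append_of_len (l1 l2 : List (String × List Int)) (s : String)
    (h2 : ∀ p ∈ l2, p.1.length ≠ s.length) :
    PySem.Dict.get? ⟨l1 ++ l2⟩ s = PySem.Dict.get? ⟨l1⟩ s := by
  simp only [PySem.Dict.get?, List.find?_append]
  have hn : l2.find? (fun p => p.1 == s) = none := by
    apply List.find?_eq_none.mpr
    intro p hp hb
    exact h2 p hp (by rw [beq_iff_eq.mp hb])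
  rw [hn, Option.or_none]

-- with nodup keys, every stored pair is what get? returns
theorem pv_get?_of_nodup_mem (l : List (String × List Int))
    (hn : (l.map Prod.fst).Nodup) (p : String × List Int) (hp : p ∈ l) :
    PySem.Dict.get? ⟨l⟩ p.1 = some p.2 := by
  induction l with
  | nil => cases hp
  | cons q t ih =>
    simp only [List.map_cons, List.nodup_cons] at hn
    rcases List.mem_cons.mp hp with hp | hp
    · subst hp; simp [PySem.Dict.get?, List.find?_cons]
    · have hne : q.1 ≠ p.1 := by
        intro he; exact hn.1 (he ▸ List.mem_map_of_mem hp)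
      have := ih hn.2 hp
      simp only [PySem.Dict.get?] at this ⊢
      rw [List.find?_cons_of_neg (by simp [hne])]
      exact this

-- overwriting twice is overwriting once
theorem pv_insert_insert (d : PySem.Dict String (List Int)) (s : String) (a b : List Int) :
    (d.insert s a).insert s b = d.insert s b := by
  apply pv_dict_ext
  by_cases h : d.contains s = true
  · have h1 : (d.insert s a).contains s = true := by simp [PySem.Dict.contains_insert]
    rw [PySem.Dict.items_insert_of_contains _ _ h1, PySem.Dict.items_insert_of_contains _ _ h,
        PySem.Dict.items_insert_of_contains _ _ h]
    rw [List.map_map]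
    apply List.map_congr_left
    intro p _
    by_cases hp : p.1 = s <;> simp [hp]
  · have h' : d.contains s = false := by simpa using h
    have h1 : (d.insert s a).contains s = true := by simp [PySem.Dict.contains_insert]
    rw [PySem.Dict.items_insert_of_contains _ _ h1, PySem.Dict.items_insert_of_not_contains _ _ h',
        PySem.Dict.items_insert_of_not_contains _ _ h']
    have hall : ∀ p ∈ d.items, (p.1 == s) = false := by
      simpa [PySem.Dict.contains, List.any_eq_false] using h'
    rw [List.map_append]
    congr 1
    · calc List.map (fun p => if (p.1 == s) = true then (s, b) else p) d.items
          = List.map id d.items := by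
            apply List.map_congr_left
            intro p hp
            simp [hall p hp]
        _ = d.items := List.map_id _
    · simp

-- re-inserting the held value changes nothing
theorem pv_insert_of_get? (d : PySem.Dict String (List Int)) (s : String) (v : List Int)
    (hn : d.keys.Nodup) (h : d.get? s = some v) : d.insert s v = d := by
  have hc : d.contains s = true := by
    by_contra hc
    have : d.contains s = false := by simpa using hc
    rw [(PySem.Dict.get?_eq_none_iff_contains d s).mpr this] at h
    cases h
  apply pv_dict_ext
  rw [PySem.Dict.items_insert_of_contains _ _ hc]
  calc List.map (fun p => if (p.1 == s) = true then (s, v) else p) d.items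
      = List.map id d.items := by
        apply List.map_congr_left
        intro p hp
        by_cases hps : p.1 = s
        · have hget : PySem.Dict.get? ⟨d.items⟩ p.1 = some p.2 := pv_get?_of_nodup_mem d.items hn p hp
          have : PySem.Dict.get? ⟨d.items⟩ p.1 = d.get? p.1 := rfl
          rw [this, hps, h] at hget
          have he : (s, v) = p := by
            rw [← hps, Option.some_inj.mp hget]
          simp [hps, he]
        · simp [hps]
    _ = d.items := List.map_id _

-- ---- pvNew (first-occurrence dedup) ----

theorem pv_new_congr (s1 s2 : List String) (l : List String)
    (h : ∀ x, x ∈ s1 ↔ x ∈ s2) : pvNew s1 l = pvNew s2 l := by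
  induction l generalizing s1 s2 with
  | nil => rfl
  | cons x xs ih =>
    simp only [pvNew]
    by_cases hx : x ∈ s1
    · rw [if_pos hx, if_pos ((h x).mp hx)]; exact ih s1 s2 h
    · rw [if_neg hx, if_neg (fun hc => hx ((h x).mpr hc))]
      congr 1
      exact ih _ _ (fun y => by simp [h y])

theorem pv_new_append (seen as bs : List String) :
    pvNew seen (as ++ bs) = pvNew seen as ++ pvNew (pvNew seen as ++ seen) bs := by
  induction as generalizing seen with
  | nil => simp [pvNew]
  | cons a as ih =>
    simp only [List.cons_append, pvNew]
    by_cases ha : a ∈ seen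
    · rw [if_pos ha, if_pos ha]; exact ih seen
    · rw [if_neg ha, if_neg ha]
      rw [ih (a :: seen)]
      simp only [List.cons_append]
      congr 2
      apply pv_new_congr
      intro y; simp; tauto

theorem pv_mem_new_or_seen (seen l : List String) (x : String) (hx : x ∈ l) :
    x ∈ pvNew seen l ∨ x ∈ seen := by
  induction l generalizing seen with
  | nil => cases hx
  | cons a as ih =>
    simp only [pvNew]
    rcases List.mem_cons.mp hx with rfl | hx
    · by_cases ha : x ∈ seen
      · right; exact ha
      · left; rw [if_neg ha]; exact List.mem_cons_self
    · by_cases ha : a ∈ seen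
      · rw [if_pos ha]; exact ih seen hx
      · rw [if_neg ha]
        rcases ih (a :: seen) hx with h | h
        · left; exact List.mem_cons_of_mem _ h
        · rcases List.mem_cons.mp h with rfl | h
          · left; exact List.mem_cons_self
          · right; exact h

theorem pv_new_nil_of_seen (seen l : List String) (h : ∀ x ∈ l, x ∈ seen) : pvNew seen l = [] := by
  induction l with
  | nil => rfl
  | cons a as ih =>
    simp only [pvNew, if_pos (h a List.mem_cons_self)]
    exact ih (fun x hx => h x (List.mem_cons_of_mem _ hx))

theorem pv_new_seen_irrel (extra seen l : List String) (h : ∀ x ∈ l, x ∉ extra) :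
    pvNew (extra ++ seen) l = pvNew seen l := by
  induction l generalizing seen with
  | nil => rfl
  | cons a as ih =>
    have ha : a ∉ extra := h a List.mem_cons_self
    simp only [pvNew]
    by_cases hs : a ∈ seen
    · rw [if_pos (List.mem_append.mpr (Or.inr hs)), if_pos hs]
      exact ih seen (fun x hx => h x (List.mem_cons_of_mem _ hx))
    · rw [if_neg (by simp [ha, hs]), if_neg hs]
      congr 1
      rw [← ih (a :: seen) (fun x hx => h x (List.mem_cons_of_mem _ hx))]
      apply pv_new_congr
      intro y; simp; tauto

theorem pv_mem_of_mem_new (seen l : List String) (x : String) (hx : x ∈ pvNew seen l) : x ∈ l := by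
  induction l generalizing seen with
  | nil => cases hx
  | cons a as ih =>
    simp only [pvNew] at hx
    by_cases ha : a ∈ seen
    · rw [if_pos ha] at hx; exact List.mem_cons_of_mem _ (ih seen hx)
    · rw [if_neg ha] at hx
      rcases List.mem_cons.mp hx with rfl | hx
      · exact List.mem_cons_self
      · exact List.mem_cons_of_mem _ (ih _ hx)

theorem pv_new_nodup_fresh (seen l : List String) :
    (pvNew seen l).Nodup ∧ ∀ x ∈ pvNew seen l, x ∉ seen := by
  induction l generalizing seen with
  | nil => exact ⟨List.nodup_nil, by simp [pvNew]⟩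
  | cons a as ih =>
    simp only [pvNew]
    by_cases ha : a ∈ seen
    · rw [if_pos ha]; exact ih seen
    · rw [if_neg ha]
      obtain ⟨hnd, hfr⟩ := ih (a :: seen)
      refine ⟨List.nodup_cons.mpr ⟨fun hc => (hfr a hc) List.mem_cons_self, hnd⟩, ?_⟩
      intro x hx
      rcases List.mem_cons.mp hx with rfl | hx
      · exact ha
      · exact fun hc => hfr x hx (List.mem_cons_of_mem _ hc)

-- the central dedup-invariance: expanding a deduped list gives the same dedup
theorem pv_new_flatMap_dedup (f : String → List String) (L : List String) :
    ∀ seen seenK : List String, (∀ x ∈ seenK, ∀ y ∈ f x, y ∈ seen) →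
    pvNew seen ((pvNew seenK L).flatMap f) = pvNew seen (L.flatMap f) := by
  induction L with
  | nil => intro seen seenK _; rfl
  | cons x L ih =>
    intro seen seenK hcond
    simp only [pvNew, List.flatMap_cons]
    by_cases hx : x ∈ seenK
    · rw [if_pos hx]
      rw [pv_new_append, pv_new_nil_of_seen seen (f x) (hcond x hx), List.nil_append]
      exact ih seen seenK hcond
    · rw [if_neg hx]
      simp only [List.flatMap_cons]
      rw [pv_new_append seen (f x), pv_new_append seen (f x)]
      congr 1
      apply ih
      intro z hz y hy
      rcases List.mem_cons.mp hz with rfl | hz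
      · rcases pv_mem_new_or_seen seen (f z) y hy with h | h
        · exact List.mem_append.mpr (Or.inl h)
        · exact List.mem_append.mpr (Or.inr h)
      · exact List.mem_append.mpr (Or.inr (hcond z hz y hy))

-- ---- pvProduct / pvStrs ----

theorem pv_product_length (α : List Char) (k : Nat) (t : List Char) (ht : t ∈ pvProduct α k) :
    t.length = k := by
  induction k generalizing t with
  | zero => simp [pvProduct] at ht; simp [ht]
  | succ k ih =>
    simp only [pvProduct, List.mem_flatMap, List.mem_map] at ht
    obtain ⟨u, hu, c, _, rfl⟩ := ht
    simp [ih u hu]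

theorem pv_strs_length (α : List Char) (k : Nat) (s : String) (hs : s ∈ pvStrs α k) :
    s.length = k := by
  simp only [pvStrs, List.mem_map] at hs
  obtain ⟨t, ht, rfl⟩ := hs
  simp [String.length_ofList, pv_product_length α k t ht]

theorem pv_strs_one (α : List Char) : pvStrs α 1 = α.map (fun c => String.ofList [c]) := by
  simp [pvStrs, pvProduct, List.flatMap_cons, List.map_map]

theorem pv_strs_succ (α : List Char) (k : Nat) :
    pvStrs α (k + 1) = (pvStrs α k).flatMap (pvF α) := by
  simp only [pvStrs, pvF, pvProduct, List.map_flatMap, List.flatMap_map, List.map_map]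
  congr 1
  funext t
  simp [Function.comp, String.ofList_append]

-- ---- pvVal ----

theorem pv_val_single (d1 : PySem.Dict String (List Int)) (c : Char) :
    pvVal d1 (String.ofList [c]) = d1.getD (String.ofList [c]) [] := by
  simp [pvVal]

theorem pv_val_append_char (d1 : PySem.Dict String (List Int)) (p : String) (c : Char) :
    pvVal d1 (p ++ String.ofList [c]) = pvVal d1 p ++ d1.getD (String.ofList [c]) [] := by
  simp [pvVal]

-- ---- the canonical skip-insert fold ----

theorem pv_addSkip_nil (v : String → List Int) (st : PySem.Dict String (List Int) × List String) :
    pvAddSkip v st [] = st := rfl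

theorem pv_addSkip_cons (v : String → List Int) (st : PySem.Dict String (List Int) × List String)
    (s : String) (t : List String) :
    pvAddSkip v st (s :: t)
      = pvAddSkip v (if st.1.contains s then st else (st.1.insert s (v s), st.2 ++ [s])) t := rfl

theorem pv_addSkip_spec (v : String → List Int) (ss : List String) :
    ∀ (d : PySem.Dict String (List Int)) (cur : List String),
    (pvAddSkip v (d, cur) ss).1.items = d.items ++ (pvNew d.keys ss).map (fun s => (s, v s)) ∧
    (pvAddSkip v (d, cur) ss).2 = cur ++ pvNew d.keys ss := by
  induction ss with
  | nil => intro d cur; simp [pv_addSkip_nil, pvNew]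
  | cons s t ih =>
    intro d cur
    rw [pv_addSkip_cons]
    by_cases hc : d.contains s = true
    · have hm : s ∈ d.keys := (PySem.Dict.contains_iff_mem_keys d s).mp hc
      simp only [hc, if_true, pvNew, if_pos hm]
      exact ih d cur
    · have hc' : d.contains s = false := by simpa using hc
      have hm : s ∉ d.keys := fun hm => by
        rw [(PySem.Dict.contains_iff_mem_keys d s).mpr hm] at hc'; cases hc'
      simp only [hc', Bool.false_eq_true, if_false, pvNew, if_neg hm]
      obtain ⟨h1, h2⟩ := ih (d.insert s (v s)) (cur ++ [s])
      rw [PySem.Dict.items_insert_of_not_contains _ _ hc'] at h1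
      rw [PySem.Dict.keys_insert_of_not_contains _ _ hc'] at h1 h2
      have hkeys : pvNew (d.keys ++ [s]) t = pvNew (s :: d.keys) t :=
        pv_new_congr _ _ t (fun y => by simp; tauto)
      constructor
      · rw [h1, hkeys]; simp
      · rw [h2, hkeys]; simp

-- unconditional insertion of determined values equals the skip fold
theorem pv_foldl_insert_eq (v : String → List Int) (ss : List String) :
    ∀ (d : PySem.Dict String (List Int)) (cur : List String), d.keys.Nodup →
    (∀ s ∈ ss, d.contains s = true → d.get? s = some (v s)) →
    ss.foldl (fun d s => d.insert s (v s)) d = (pvAddSkip v (d, cur) ss).1 := by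
  induction ss with
  | nil => intro d cur _ _; rfl
  | cons s t ih =>
    intro d cur hn hcompat
    rw [pv_addSkip_cons, List.foldl_cons]
    by_cases hc : d.contains s = true
    · have heq : d.insert s (v s) = d :=
        pv_insert_of_get? d s (v s) hn (hcompat s List.mem_cons_self hc)
      simp only [hc, if_true, heq]
      exact ih d cur hn (fun s' hs' => hcompat s' (List.mem_cons_of_mem _ hs'))
    · have hc' : d.contains s = false := by simpa using hc
      simp only [hc', Bool.false_eq_true, if_false]
      apply ih
      · exact PySem.Dict.nodup_keys_insert d s (v s) hn
      · intro s' hs' hcs'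
        by_cases hss : s' = s
        · subst hss; rw [PySem.Dict.get?_insert_self]
        · rw [PySem.Dict.get?_insert_of_ne _ _ hss]
          rw [PySem.Dict.contains_insert] at hcs'
          have : d.contains s' = true := by
            rcases Bool.or_eq_true_iff.mp hcs' with h | h
            · exact absurd (beq_iff_eq.mp h) hss
            · exact h
          exact hcompat s' (List.mem_cons_of_mem _ hs') this

-- A's += rebuild of one seq collapses to a single insert
theorem pv_tuple_fold (t : List Char) :
    ∀ (d : PySem.Dict String (List Int)) (seq : String) (acc : List Int) (vc : Char → List Int),
    (∀ c ∈ t, String.ofList [c] ≠ seq ∧ d.getD (String.ofList [c]) [] = vc c) →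
    t.foldl (fun d' c => d'.insert seq (d'.getD seq [] ++ d'.getD (String.ofList [c]) []))
        (d.insert seq acc)
      = d.insert seq (acc ++ (t.map vc).flatten) := by
  induction t with
  | nil => intro d seq acc vc _; simp
  | cons c t ih =>
    intro d seq acc vc h
    obtain ⟨hne, hval⟩ := h c List.mem_cons_self
    simp only [List.foldl_cons]
    have h1 : (d.insert seq acc).getD seq [] = acc := PySem.Dict.getD_insert_self d seq acc []
    have h2 : (d.insert seq acc).getD (String.ofList [c]) [] = vc c := by
      simp only [PySem.Dict.getD] at hval ⊢
      rw [PySem.Dict.get?_insert_of_ne d acc hne]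
      exact hval
    rw [h1, h2, pv_insert_insert]
    rw [ih d seq (acc ++ vc c) vc (fun c' hc' => h c' (List.mem_cons_of_mem _ hc'))]
    simp


-- ---- the two level steps, reduced to the canonical fold ----

theorem pv_stepA_eq (α : List Char) (d1 d : PySem.Dict String (List Int)) (k : Nat) (h2 : 2 ≤ k)
    (hsingle : ∀ c : Char, d.get? (String.ofList [c]) = d1.get? (String.ofList [c]))
    (hfresh : ∀ s ∈ pvStrs α k, d.contains s = false)
    (hn : d.keys.Nodup) :
    pvStepA α d (k : Int) = (pvAddSkip (pvVal d1) (d, []) (pvStrs α k)).1 := by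
  unfold pvStepA
  have htn : ((k : Int)).toNat = k := Int.toNat_natCast k
  rw [htn]
  have hP : ∀ acc : PySem.Dict String (List Int),
      (∀ c : Char, acc.get? (String.ofList [c]) = d1.get? (String.ofList [c])) →
      ∀ t ∈ pvProduct α k,
      (t.foldl
        (fun d' c =>
          d'.insert (String.ofList t)
            (d'.getD (String.ofList t) [] ++ d'.getD (String.ofList [c]) []))
        (acc.insert (String.ofList t) ([] : List Int)))
        = acc.insert (String.ofList t) (pvVal d1 (String.ofList t)) := by
    intro acc hacc t ht
    have hlen : t.length = k := pv_product_length α k t ht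
    rw [pv_tuple_fold t acc (String.ofList t) [] (fun c => d1.getD (String.ofList [c]) [])
        (fun c _ => ⟨by
          intro he
          have := congrArg String.length he
          simp [String.length_ofList, hlen] at this
          omega, by
          simp only [PySem.Dict.getD, hacc c]⟩)]
    simp [pvVal]
  obtain ⟨heq, _⟩ := pvFoldlCongrInv
    (fun acc : PySem.Dict String (List Int) =>
      ∀ c : Char, acc.get? (String.ofList [c]) = d1.get? (String.ofList [c]))
    (pvProduct α k)
    (fun d alleles =>
      alleles.foldl
        (fun d' c =>
          d'.insert (String.ofList alleles)
            (d'.getD (String.ofList alleles) [] ++ d'.getD (String.ofList [c]) []))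
        (d.insert (String.ofList alleles) ([] : List Int)))
    (fun d alleles => d.insert (String.ofList alleles) (pvVal d1 (String.ofList alleles)))
    d hsingle
    (by
      intro acc t hacc ht
      refine ⟨hP acc hacc t ht, ?_⟩
      intro c
      have hne : String.ofList [c] ≠ String.ofList t := by
        intro he
        have := congrArg String.length he
        simp [String.length_ofList, pv_product_length α k t ht] at this
        omega
      rw [PySem.Dict.get?_insert_of_ne _ _ hne]
      exact hacc c)
  rw [heq]
  have hmap : (pvStrs α k).foldl (fun d s => d.insert s (pvVal d1 s)) d
      = (pvProduct α k).foldl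
          (fun d alleles => d.insert (String.ofList alleles) (pvVal d1 (String.ofList alleles))) d := by
    simp [pvStrs, List.foldl_map]
  rw [← hmap]
  exact pv_foldl_insert_eq (pvVal d1) (pvStrs α k) d [] hn
    (fun s hs hc => absurd hc (by simp [hfresh s hs]))

theorem pv_stepB_eq (α : List Char) (d1 d : PySem.Dict String (List Int)) (ps : List String)
    (L : Nat) (hL : 1 ≤ L)
    (hlen : ∀ p ∈ ps, p.length = L)
    (hp : ∀ p ∈ ps, d.get? p = some (pvVal d1 p))
    (hs : ∀ c ∈ α, d.get? (String.ofList [c]) = some (d1.getD (String.ofList [c]) []))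
    (k : Int) :
    pvStepB α (d, ps) k = pvAddSkip (pvVal d1) (d, []) (ps.flatMap (pvF α)) := by
  unfold pvStepB
  have hrhs : pvAddSkip (pvVal d1) (d, []) (ps.flatMap (pvF α))
      = ps.foldl (fun st2 p => pvAddSkip (pvVal d1) st2 (pvF α p)) (d, []) := by
    simp [pvAddSkip, List.foldl_flatMap]
  rw [hrhs]
  obtain ⟨heq, _⟩ := pvFoldlCongrInv
    (fun st : PySem.Dict String (List Int) × List String =>
      ∀ q : String, q.length ≠ L + 1 → st.1.get? q = d.get? q)
    ps
    (fun st2 p =>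
      α.foldl
        (fun st3 c =>
          if st3.1.contains (p ++ String.ofList [c]) then st3
          else (st3.1.insert (p ++ String.ofList [c])
                  (st3.1.getD p [] ++ st3.1.getD (String.ofList [c]) []),
                st3.2 ++ [p ++ String.ofList [c]]))
        st2)
    (fun st2 p => pvAddSkip (pvVal d1) st2 (pvF α p))
    (d, []) (fun _ _ => rfl)
    (by
      intro st2 p hst2 hpmem
      beta_reduce
      have hplen : p.length = L := hlen p hpmem
      have hinner := pvFoldlCongrInv
        (fun st : PySem.Dict String (List Int) × List String =>
          ∀ q : String, q.length ≠ L + 1 → st.1.get? q = d.get? q)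
        α
        (fun st3 c =>
          if st3.1.contains (p ++ String.ofList [c]) then st3
          else (st3.1.insert (p ++ String.ofList [c])
                  (st3.1.getD p [] ++ st3.1.getD (String.ofList [c]) []),
                st3.2 ++ [p ++ String.ofList [c]]))
        (fun st3 c =>
          if st3.1.contains (p ++ String.ofList [c]) then st3
          else (st3.1.insert (p ++ String.ofList [c]) (pvVal d1 (p ++ String.ofList [c])),
                st3.2 ++ [p ++ String.ofList [c]]))
        st2 hst2
        (by
          intro st3 c hst3 hcmem
          beta_reduce
          have hsl : (p ++ String.ofList [c]).length = L + 1 := by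
            simp [String.length_append, String.length_ofList, hplen]
          constructor
          · by_cases hc : st3.1.contains (p ++ String.ofList [c]) = true
            · simp [hc]
            · have hgp : st3.1.getD p [] = pvVal d1 p := by
                simp only [PySem.Dict.getD]
                rw [hst3 p (by omega), hp p hpmem]
                rfl
              have hgc : st3.1.getD (String.ofList [c]) [] = d1.getD (String.ofList [c]) [] := by
                simp only [PySem.Dict.getD]
                rw [hst3 (String.ofList [c]) (by simp [String.length_ofList]; omega), hs c hcmem]
                rfl
              simp only [hc, Bool.false_eq_true, if_false, hgp, hgc, pv_val_append_char]
          · by_cases hc : st3.1.contains (p ++ String.ofList [c]) = true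
            · simpa [hc] using hst3
            · simp only [hc, Bool.false_eq_true, if_false]
              intro q hq
              rw [PySem.Dict.get?_insert_of_ne _ _ (fun he => hq (by rw [he, hsl]))]
              exact hst3 q hq)
      refine ⟨?_, ?_⟩
      · rw [hinner.1]
        have : pvAddSkip (pvVal d1) st2 (pvF α p)
            = α.foldl (fun st3 c =>
                if st3.1.contains (p ++ String.ofList [c]) then st3
                else (st3.1.insert (p ++ String.ofList [c]) (pvVal d1 (p ++ String.ofList [c])),
                      st3.2 ++ [p ++ String.ofList [c]])) st2 := by
          simp [pvAddSkip, pvF, List.foldl_map]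
        rw [this]
      · have : pvAddSkip (pvVal d1) st2 (pvF α p)
            = α.foldl (fun st3 c =>
                if st3.1.contains (p ++ String.ofList [c]) then st3
                else (st3.1.insert (p ++ String.ofList [c]) (pvVal d1 (p ++ String.ofList [c])),
                      st3.2 ++ [p ++ String.ofList [c]])) st2 := by
          simp [pvAddSkip, pvF, List.foldl_map]
        rw [this]
        exact hinner.2)
  exact heq


-- ---- the initial single-character dict ----

theorem pv_onehot (n : Nat) (i : Int) (h0 : 0 ≤ i) (hn : i < n) :
    (List.replicate n (0 : Int)).set i.toNat 1
      = (PySem.List.pyRange 0 (n : Int) 1).map (fun j => if j = i then (1 : Int) else 0) := by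
  apply List.ext_getElem
  · simp [PySem.List.length_pyRange_one]
  · intro k h1 h2
    simp only [List.getElem_set, List.getElem_replicate, List.getElem_map,
      PySem.List.getElem_pyRange_one]
    split_ifs <;> omega

theorem pv_init_eq (alphabet : String) : pvInitB alphabet = pvInitA alphabet := by
  unfold pvInitA pvInitB
  apply PySem.List.foldl_congr_mem
  intro acc ic hic
  obtain ⟨k, hk, rfl⟩ := (PySem.List.mem_enumerate_iff alphabet.toList 0 ic).mp hic
  have h0 : (0 : Int) ≤ 0 + (k : Int) := by omega
  have hn : 0 + (k : Int) < alphabet.toList.length := by omega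
  rw [pv_onehot alphabet.toList.length (0 + (k : Int)) h0 hn]

theorem pv_init_facts_aux (n : Nat) (l : List (Int × Char)) :
    ∀ d : PySem.Dict String (List Int),
    ((l.foldl (fun d ic =>
        d.insert (String.ofList [ic.2]) ((List.replicate n (0 : Int)).set ic.1.toNat 1)) d).keys
      = d.keys ++ pvNew d.keys (l.map (fun ic => String.ofList [ic.2])))
    ∧ (d.keys.Nodup → (l.foldl (fun d ic =>
        d.insert (String.ofList [ic.2]) ((List.replicate n (0 : Int)).set ic.1.toNat 1)) d).keys.Nodup)
    ∧ ((∀ p ∈ d.items, p.1.length = 1) → ∀ p ∈ (l.foldl (fun d ic =>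
        d.insert (String.ofList [ic.2]) ((List.replicate n (0 : Int)).set ic.1.toNat 1)) d).items,
        p.1.length = 1) := by
  induction l with
  | nil => intro d; exact ⟨by simp [pvNew], fun h => h, fun h => h⟩
  | cons x t ih =>
    intro d
    simp only [List.foldl_cons, List.map_cons]
    set xk := String.ofList [x.2] with hxk
    set d' := d.insert xk ((List.replicate n (0 : Int)).set x.1.toNat 1) with hd'
    obtain ⟨ihk, ihn, ihl⟩ := ih d'
    refine ⟨?_, ?_, ?_⟩
    · rw [ihk]
      by_cases hc : d.contains xk = true
      · have hm : xk ∈ d.keys := (PySem.Dict.contains_iff_mem_keys d xk).mp hc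
        rw [hd', PySem.Dict.keys_insert_of_contains _ _ hc]
        simp [pvNew, hm]
      · have hc' : d.contains xk = false := by simpa using hc
        have hm : xk ∉ d.keys := fun hm => by
          rw [(PySem.Dict.contains_iff_mem_keys d xk).mpr hm] at hc'; cases hc'
        rw [hd', PySem.Dict.keys_insert_of_not_contains _ _ hc']
        simp only [pvNew, if_neg hm]
        rw [pv_new_congr (d.keys ++ [xk]) (xk :: d.keys) _ (fun y => by simp; tauto)]
        simp
    · intro hnd
      exact ihn (PySem.Dict.nodup_keys_insert _ _ _ hnd)
    · intro hlen
      apply ihl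
      intro p hp
      by_cases hc : d.contains xk = true
      · rw [hd', PySem.Dict.items_insert_of_contains _ _ hc] at hp
        obtain ⟨q, hq, rfl⟩ := List.mem_map.mp hp
        by_cases hqx : (q.1 == xk) = true
        · have hq1 : q.1 = String.ofList [x.2] := by rw [← hxk]; exact beq_iff_eq.mp hqx
          simp [hq1, hxk]
        · simpa [hqx] using hlen q hq
      · have hc' : d.contains xk = false := by simpa using hc
        rw [hd', PySem.Dict.items_insert_of_not_contains _ _ hc'] at hp
        rcases List.mem_append.mp hp with hp | hp
        · exact hlen p hp
        · simp only [List.mem_singleton] at hp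
          simp [hp, hxk, String.length_ofList]

theorem pv_enum_keys (α : List Char) :
    (PySem.List.enumerate α).map (fun ic => String.ofList [ic.2])
      = α.map (fun c => String.ofList [c]) := by
  conv_rhs => rw [← PySem.List.map_snd_enumerate α 0]
  rw [List.map_map]
  rfl

theorem pv_initA_keys (alphabet : String) :
    (pvInitA alphabet).keys = pvNew [] (pvStrs alphabet.toList 1) := by
  unfold pvInitA
  rw [(pv_init_facts_aux alphabet.toList.length (PySem.List.enumerate alphabet.toList)
        PySem.Dict.empty).1, pv_enum_keys, ← pv_strs_one]
  have he : (PySem.Dict.empty : PySem.Dict String (List Int)).keys = [] := rfl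
  rw [he, List.nil_append]

theorem pv_initA_nodup (alphabet : String) : (pvInitA alphabet).keys.Nodup := by
  unfold pvInitA
  apply (pv_init_facts_aux alphabet.toList.length (PySem.List.enumerate alphabet.toList)
    PySem.Dict.empty).2.1
  have he : (PySem.Dict.empty : PySem.Dict String (List Int)).keys = [] := rfl
  rw [he]
  exact List.nodup_nil

theorem pv_initA_len1 (alphabet : String) : ∀ p ∈ (pvInitA alphabet).items, p.1.length = 1 := by
  unfold pvInitA
  apply (pv_init_facts_aux alphabet.toList.length (PySem.List.enumerate alphabet.toList)
    PySem.Dict.empty).2.2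
  intro p hp
  have he : (PySem.Dict.empty : PySem.Dict String (List Int)).items = [] := rfl
  rw [he] at hp
  cases hp

theorem pv_initA_get? (alphabet : String) (c : Char) (hc : c ∈ alphabet.toList) :
    (pvInitA alphabet).get? (String.ofList [c])
      = some ((pvInitA alphabet).getD (String.ofList [c]) []) := by
  have hm : String.ofList [c] ∈ (pvInitA alphabet).keys := by
    rw [pv_initA_keys, pv_strs_one]
    have hx : String.ofList [c] ∈ alphabet.toList.map (fun c => String.ofList [c]) :=
      List.mem_map_of_mem hc
    rcases pv_mem_new_or_seen [] _ _ hx with h | h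
    · exact h
    · cases h
  have hcont : (pvInitA alphabet).contains (String.ofList [c]) = true :=
    (PySem.Dict.contains_iff_mem_keys _ _).mpr hm
  cases hg : (pvInitA alphabet).get? (String.ofList [c]) with
  | none =>
    rw [PySem.Dict.get?_eq_none_iff_contains] at hg
    rw [hg] at hcont; cases hcont
  | some w => simp [PySem.Dict.getD, hg]

-- ---- canonical levels ----

theorem pv_KS_eq (α : List Char) (k1 : List String) (hk1 : k1 = pvNew [] (pvStrs α 1)) :
    ∀ j : Nat, pvKS α k1 j = pvNew [] (pvStrs α (j + 1)) := by
  intro j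
  induction j with
  | zero => exact hk1
  | succ j ih =>
    show pvNew [] ((pvKS α k1 j).flatMap (pvF α)) = _
    rw [ih, pv_new_flatMap_dedup (pvF α) (pvStrs α (j + 1)) [] [] (by simp)]
    rw [← pv_strs_succ]

theorem pv_DI_facts (α : List Char) (d1 : PySem.Dict String (List Int))
    (h1len : ∀ p ∈ d1.items, p.1.length = 1)
    (h1n : d1.keys.Nodup) : ∀ j : Nat,
    (((pvDI α d1 j).map (fun p => p.1)).Nodup)
    ∧ (∀ p ∈ pvDI α d1 j, 1 ≤ p.1.length ∧ p.1.length ≤ j + 1)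
    ∧ (∀ s ∈ pvKS α d1.keys j, s.length = j + 1)
    ∧ (∀ s ∈ pvKS α d1.keys j, PySem.Dict.get? ⟨pvDI α d1 j⟩ s = some (pvVal d1 s))
    ∧ (∃ rest, pvDI α d1 j = d1.items ++ rest ∧ ∀ p ∈ rest, 2 ≤ p.1.length) := by
  intro j
  induction j with
  | zero =>
    refine ⟨h1n, ?_, ?_, ?_, [], by simp [pvDI], by simp⟩
    · intro p hp
      have := h1len p hp
      omega
    · intro s hs
      have hs' : s ∈ d1.items.map (fun x => x.1) := hs
      obtain ⟨p, hp, rfl⟩ := List.mem_map.mp hs'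
      exact h1len p hp
    · intro s hs
      have hs' : s ∈ d1.items.map (fun x => x.1) := hs
      obtain ⟨p, hp, rfl⟩ := List.mem_map.mp hs'
      have hget : PySem.Dict.get? ⟨d1.items⟩ p.1 = some p.2 :=
        pv_get?_of_nodup_mem d1.items h1n p hp
      have hlen1 : p.1.toList.length = 1 := by
        rw [String.length_toList]
        exact h1len p hp
      obtain ⟨ch, hch⟩ := List.length_eq_one_iff.mp hlen1
      have hofl : String.ofList [ch] = p.1 := by rw [← hch, String.ofList_toList]
      have hval : pvVal d1 p.1 = p.2 := by
        rw [← hofl, pv_val_single, hofl]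
        show (d1.get? p.1).getD [] = p.2
        have hget' : d1.get? p.1 = some p.2 := hget
        rw [hget']
        rfl
      rw [hval]
      exact hget
  | succ j ih =>
    obtain ⟨ihn, ihlen, ihKlen, ihKget, rest, hrest, hrlen⟩ := ih
    have hKlen1 : ∀ s ∈ pvKS α d1.keys (j + 1), s.length = j + 2 := by
      intro s hs
      have hs' := pv_mem_of_mem_new _ _ _ hs
      obtain ⟨p, hp, hsF⟩ := List.mem_flatMap.mp hs'
      simp only [pvF, List.mem_map] at hsF
      obtain ⟨ch, _, rfl⟩ := hsF
      rw [String.length_append, String.length_ofList]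
      have hl := ihKlen p hp
      simp only [List.length_cons, List.length_nil, hl]
    have hkeys : (pvDI α d1 (j + 1)).map (fun p => p.1)
        = (pvDI α d1 j).map (fun p => p.1) ++ pvKS α d1.keys (j + 1) := by
      show ((pvDI α d1 j ++ (pvKS α d1.keys (j + 1)).map (fun s => (s, pvVal d1 s))).map
        (fun p => p.1)) = _
      rw [List.map_append, List.map_map]
      simp only [Function.comp_def]
      simp
    have hnodup : ((pvDI α d1 (j + 1)).map (fun p => p.1)).Nodup := by
      rw [hkeys, List.nodup_append]
      refine ⟨ihn, (pv_new_nodup_fresh _ _).1, ?_⟩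
      intro a ha b hb
      obtain ⟨p, hp, rfl⟩ := List.mem_map.mp ha
      have h1 := (ihlen p hp).2
      have h2 := hKlen1 b hb
      intro he
      rw [he] at h1
      omega
    refine ⟨hnodup, ?_, hKlen1, ?_,
      rest ++ (pvKS α d1.keys (j + 1)).map (fun s => (s, pvVal d1 s)), ?_, ?_⟩
    · intro p hp
      have hp' : p ∈ pvDI α d1 j ++ (pvKS α d1.keys (j + 1)).map (fun s => (s, pvVal d1 s)) := hp
      rcases List.mem_append.mp hp' with hp2 | hp2
      · have := ihlen p hp2
        omega
      · obtain ⟨s, hsK, rfl⟩ := List.mem_map.mp hp2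
        have := hKlen1 s hsK
        simp only at this ⊢
        omega
    · intro s hs
      have hmem : (s, pvVal d1 s) ∈ pvDI α d1 (j + 1) := by
        show _ ∈ pvDI α d1 j ++ _
        exact List.mem_append.mpr (Or.inr (List.mem_map_of_mem hs))
      exact pv_get?_of_nodup_mem _ hnodup (s, pvVal d1 s) hmem
    · show pvDI α d1 j ++ _ = _
      rw [hrest, List.append_assoc]
    · intro p hp
      rcases List.mem_append.mp hp with hp2 | hp2
      · exact hrlen p hp2
      · obtain ⟨s, hsK, rfl⟩ := List.mem_map.mp hp2
        have := hKlen1 s hsK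
        simp only at this ⊢
        omega

-- ---- the main level-by-level induction ----

theorem pv_levels (α : List Char) (d1 : PySem.Dict String (List Int))
    (h1len : ∀ p ∈ d1.items, p.1.length = 1)
    (h1n : d1.keys.Nodup)
    (h1keys : d1.keys = pvNew [] (pvStrs α 1))
    (h1get : ∀ c ∈ α, d1.get? (String.ofList [c]) = some (d1.getD (String.ofList [c]) [])) :
    ∀ j : Nat,
    ((PySem.List.pyRange 2 (2 + (j : Int)) 1).foldl (pvStepA α) d1 = ⟨pvDI α d1 j⟩)
    ∧ ((PySem.List.pyRange 2 (2 + (j : Int)) 1).foldl (pvStepB α) (d1, d1.keys)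
        = (⟨pvDI α d1 j⟩, pvKS α d1.keys j)) := by
  intro j
  induction j with
  | zero =>
    have hnil : PySem.List.pyRange 2 (2 + ((0 : Nat) : Int)) 1 = [] :=
      PySem.List.pyRange_one_eq_nil (by norm_num)
    rw [hnil]
    constructor <;> rfl
  | succ j ih =>
    obtain ⟨ihA, ihB⟩ := ih
    have hsplit : PySem.List.pyRange 2 (2 + ((j + 1 : Nat) : Int)) 1
        = PySem.List.pyRange 2 (2 + (j : Int)) 1 ++ [2 + (j : Int)] := by
      have h1 : (2 + ((j + 1 : Nat) : Int)) = (2 + (j : Int)) + 1 := by push_cast; ring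
      rw [h1]
      exact PySem.List.pyRange_one_succ_right (by omega)
    obtain ⟨fn, flen, fKlen, fKget, rest, hrest, hrlen⟩ := pv_DI_facts α d1 h1len h1n j
    have hsingle : ∀ c : Char,
        PySem.Dict.get? ⟨pvDI α d1 j⟩ (String.ofList [c]) = d1.get? (String.ofList [c]) := by
      intro c
      rw [hrest]
      exact pv_get?_append_of_len d1.items rest _ (fun p hp => by
        have := hrlen p hp
        simp only [String.length_ofList, List.length_cons, List.length_nil]
        omega)
    have hkeysmk : (PySem.Dict.mk (pvDI α d1 j)).keys = (pvDI α d1 j).map (fun p => p.1) :=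
      PySem.Dict.keys_mk _
    have hfreshA : ∀ s ∈ pvStrs α (j + 2),
        (PySem.Dict.mk (pvDI α d1 j)).contains s = false := by
      intro s hsm
      have hl := pv_strs_length α (j + 2) s hsm
      cases hcs : (PySem.Dict.mk (pvDI α d1 j)).contains s with
      | false => rfl
      | true =>
        exfalso
        have hmem := (PySem.Dict.contains_iff_mem_keys _ _).mp hcs
        rw [hkeysmk] at hmem
        obtain ⟨p, hp, hps⟩ := List.mem_map.mp hmem
        have := (flen p hp).2
        rw [hps] at this
        omega
    have hnewA : pvNew (PySem.Dict.mk (pvDI α d1 j)).keys (pvStrs α (j + 2))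
        = pvKS α d1.keys (j + 1) := by
      have hirr := pv_new_seen_irrel ((PySem.Dict.mk (pvDI α d1 j)).keys) [] (pvStrs α (j + 2))
        (fun x hx hmem => by
          have hl := pv_strs_length α (j + 2) x hx
          rw [hkeysmk] at hmem
          obtain ⟨p, hp, hps⟩ := List.mem_map.mp hmem
          have := (flen p hp).2
          rw [hps] at this
          omega)
      rw [List.append_nil] at hirr
      rw [hirr, ← pv_KS_eq α d1.keys h1keys (j + 1)]
    have hA : pvStepA α (⟨pvDI α d1 j⟩ : PySem.Dict String (List Int)) (2 + (j : Int))
        = ⟨pvDI α d1 (j + 1)⟩ := by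
      have hcast : (2 + (j : Int)) = (((j + 2 : Nat)) : Int) := by push_cast; ring
      rw [hcast, pv_stepA_eq α d1 ⟨pvDI α d1 j⟩ (j + 2) (by omega) hsingle hfreshA
        (by rw [hkeysmk]; exact fn)]
      apply pv_dict_ext
      rw [(pv_addSkip_spec (pvVal d1) (pvStrs α (j + 2)) ⟨pvDI α d1 j⟩ []).1, hnewA]
      rfl
    have hfreshB : ∀ x ∈ (pvKS α d1.keys j).flatMap (pvF α),
        x ∉ (PySem.Dict.mk (pvDI α d1 j)).keys := by
      intro x hx hmem
      obtain ⟨p, hp, hxF⟩ := List.mem_flatMap.mp hx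
      simp only [pvF, List.mem_map] at hxF
      obtain ⟨c, _, rfl⟩ := hxF
      have hxlen : (p ++ String.ofList [c]).length = j + 2 := by
        rw [String.length_append, String.length_ofList]
        have := fKlen p hp
        simp only [List.length_cons, List.length_nil]
        omega
      rw [hkeysmk] at hmem
      obtain ⟨q, hq, hqs⟩ := List.mem_map.mp hmem
      have := (flen q hq).2
      rw [hqs, hxlen] at this
      omega
    have hnewB : pvNew (PySem.Dict.mk (pvDI α d1 j)).keys ((pvKS α d1.keys j).flatMap (pvF α))
        = pvKS α d1.keys (j + 1) := by
      have hirr := pv_new_seen_irrel ((PySem.Dict.mk (pvDI α d1 j)).keys) []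
        ((pvKS α d1.keys j).flatMap (pvF α)) hfreshB
      rw [List.append_nil] at hirr
      rw [hirr]
      rfl
    have hB : pvStepB α (⟨pvDI α d1 j⟩, pvKS α d1.keys j) (2 + (j : Int))
        = (⟨pvDI α d1 (j + 1)⟩, pvKS α d1.keys (j + 1)) := by
      rw [pv_stepB_eq α d1 ⟨pvDI α d1 j⟩ (pvKS α d1.keys j) (j + 1) (by omega) fKlen fKget
        (fun c hcm => by rw [hsingle c]; exact h1get c hcm) (2 + (j : Int))]
      obtain ⟨hs1, hs2⟩ := pv_addSkip_spec (pvVal d1) ((pvKS α d1.keys j).flatMap (pvF α))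
        ⟨pvDI α d1 j⟩ []
      have h1 : (pvAddSkip (pvVal d1) (⟨pvDI α d1 j⟩, [])
          ((pvKS α d1.keys j).flatMap (pvF α))).1 = (⟨pvDI α d1 (j + 1)⟩ :
            PySem.Dict String (List Int)) := by
        apply pv_dict_ext
        rw [hs1, hnewB]
        rfl
      have h2 : (pvAddSkip (pvVal d1) (⟨pvDI α d1 j⟩, [])
          ((pvKS α d1.keys j).flatMap (pvF α))).2 = pvKS α d1.keys (j + 1) := by
        rw [hs2, hnewB]
        simp
      rw [← h1, ← h2]
    constructor
    · rw [hsplit, List.foldl_append, ihA]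
      simpa using hA
    · rw [hsplit, List.foldl_append, ihB]
      simpa using hB

theorem get_one_hot_subseq_key_spec : Claim_equal_get_one_hot_subseq_key := by
  unfold Claim_equal_get_one_hot_subseq_key Spec_get_one_hot_subseq_key
  intro alphabet max_l _
  show (if max_l > 1 then
        (PySem.List.pyRange 2 max_l 1).foldl (pvStepA alphabet.toList) (pvInitA alphabet)
      else pvInitA alphabet).items
    = ((PySem.List.pyRange 2 max_l 1).foldl (pvStepB alphabet.toList)
        (pvInitB alphabet, (pvInitB alphabet).keys)).1.items
  rw [pv_init_eq]
  have h1len := pv_initA_len1 alphabet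
  have h1n := pv_initA_nodup alphabet
  have h1keys := pv_initA_keys alphabet
  have h1get : ∀ c ∈ alphabet.toList,
      (pvInitA alphabet).get? (String.ofList [c])
        = some ((pvInitA alphabet).getD (String.ofList [c]) []) :=
    fun c hc => pv_initA_get? alphabet c hc
  by_cases h : max_l > 1
  · rw [if_pos h]
    have hml : max_l = 2 + (((max_l - 2).toNat : Nat) : Int) := by omega
    obtain ⟨hA, hB⟩ := pv_levels alphabet.toList (pvInitA alphabet) h1len h1n h1keys h1get
      (max_l - 2).toNat
    rw [hml, hA, hB]
  · rw [if_neg h]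
    have hnil : PySem.List.pyRange 2 max_l 1 = [] :=
      PySem.List.pyRange_one_eq_nil (by omega)
    rw [hnil]
    rfl
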